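/-
  A SMALL WORKED EXAMPLE OF THE METHOD, EVERY INSTRUCTION STEPPED BY HAND: the compiled byte-copy loop of `proofs/c/toy1.c` (`byte_copy`,
  24 bytes at 1000E0H of toy1.bin) is
  correct ON THE MODEL — run by the model's `X86.run` with the model's real decoder (`Dec.decoder μ (Dec.mkTable X86.allRows)`) from any machine in
  the model's user-mode relation `User.Abs n m v0` (X86/Derived/User/Abs.lean: long mode, flat segments, identity paging with the page tables'
  Accessed / Dirty flags free — the interpreter's literal start machine is in it, `User.start_abs`) at EITHER privilege level (`n.cpl` = 0 or 3: ONE proof).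
  The theorem `byte_copy_correct_v3`: from the entry of `byte_copy` with dst, src, len in rdi, rsi, rdx and the return address on the stack, the run
  reaches the return address with `len` bytes copied from `src` to `dst`, rsp popped, every register except rax, rcx, rsp as it was, and the system
  part of the machine unchanged. Every instruction is stepped by
  `v3_insn` = the decode fact + the flat reading `Sem.wpUser` of the instruction's body computed by unfolding (X86/Derived/Prog/Insn.lean): no
  per-instruction lemma. Arithmetic by `word_omega` (Word/Arith.lean).
-/
import X86.Derived.Prog.Insn
import X86.Derived.Prog.AluLemmas
import X86.Derived.Prog.CondLemmas
import X86.Derived.User.Frame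
import Word.Arith
import Prog.Toy1Bytes

namespace X86
open X86.User (CodeAt RegsKept Span FlagsOK Layout toNat_add_ofNat toNat_ofNat_lt' add_ofNat_add)
open Toy1Bytes Word

set_option maxRecDepth 10000
set_option maxHeartbeats 4000000
set_option linter.unusedSimpArgs false
set_option linter.unusedVariables false

/-- What `byte_copy` needs of its caller. `v0` is the view on entry. -/
structure CopyPre (n : User.Layout) (v0 : User.State) (dst src len ret : Word) : Prop where
  code : CodeAt v0.mem 0x1000e0 byte_copy_bytes
  mapped : 0x200000 ≤ n.pages * 0x200000
  nle : n.pages ≤ 512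
  rip : v0.rip = 0x1000e0
  rdi : v0.reg .rdi = dst
  rsi : v0.reg .rsi = src
  rdx : v0.reg .rdx = len
  sp : User.inRange n.pages (v0.reg .rsp) 8
  retAddr : UInt64.ofNat (v0.mem.readLE (v0.reg .rsp) 8) = ret
  retlt : ret < 0x40000000
  srcR : User.inRange n.pages src len.toNat
  dstR : User.inRange n.pages dst len.toNat
  dstLo : 0x100000 ≤ dst.toNat
  /-- the source and the stack slot lie in the user region (at or above 1 MB) -/
  srcOut : 0x100000 ≤ src.toNat
  spOut : 0x100000 ≤ (v0.reg .rsp).toNat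
  /-- the destination does not overlap the code, the return-address slot, or the source -/
  dCode : dst.toNat + len.toNat ≤ 0x1000e0 ∨ 0x1000e0 + 24 ≤ dst.toNat
  dStack : dst.toNat + len.toNat ≤ (v0.reg .rsp).toNat ∨ (v0.reg .rsp).toNat + 8 ≤ dst.toNat
  dSrc : dst.toNat + len.toNat ≤ src.toNat ∨ src.toNat + len.toNat ≤ dst.toNat

/-- The loop invariant at 1000F2H (`cmp rax, rdx`), after `i` bytes. -/
structure CopyInv (v0 : User.State) (dst src len ret : Word) (i : Nat) (v : User.State) : Prop where
  rip : v.rip = 0x1000f2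
  rax : v.reg .rax = UInt64.ofNat i
  ile : i ≤ len.toNat
  others : ∀ r, r ≠ .rax → r ≠ .rcx → v.reg r = v0.reg r
  mem : v.mem = v0.mem.load dst (v0.mem.readBytes src i)
  code : CodeAt v.mem 0x1000e0 byte_copy_bytes
  retAddr : UInt64.ofNat (v.mem.readLE (v0.reg .rsp) 8) = ret
  srcB : ∀ j, j < len.toNat → v.mem.read (src + UInt64.ofNat j) = v0.mem.read (src + UInt64.ofNat j)

section
variable {n : User.Layout} {v0 : User.State} {dst src len ret : Word}

/-- The code is mapped: any instruction address in it can be fetched. -/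
theorem CopyPre.fetch (hp : CopyPre n v0 dst src len ret) (a : Word) (ha : 0x100000 ≤ a.toNat ∧ a.toNat + 15 ≤ 0x200000) : n.Has a 15 := by
  have := hp.mapped
  unfold User.Layout.Has User.Layout.lo User.Layout.hi
  omega

/-- One trip round the loop, or out of it. -/
theorem copy_body (hp : CopyPre n v0 dst src len ret) (i : Nat) (v : User.State) (hi : CopyInv v0 dst src len ret i v) :
    Reach n v (fun v' =>
      (i = len.toNat ∧ v'.rip = 0x1000f7 ∧ v'.mem = v.mem ∧ (∀ r, r ≠ .rax → r ≠ .rcx → v'.reg r = v0.reg r)) ∨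
      (i < len.toNat ∧ CopyInv v0 dst src len ret (i + 1) v')) := by
  have hdR := hp.dstR
  have hsR := hp.srcR
  have hspR := hp.sp
  have hmap := hp.mapped
  have hnle := hp.nle
  have hile := hi.ile
  have hdLo := hp.dstLo
  have hlo : 0x100000 = 0x100000 := rfl
  have hdCode := hp.dCode
  have hdStack := hp.dStack
  have hdSrc := hp.dSrc
  have hsOut := hp.srcOut
  unfold User.inRange at hdR hsR hspR
  have hrdx : v.reg .rdx = len := by rw [hi.others _ (by decide) (by decide)]; exact hp.rdx
  have hrsi : v.reg .rsi = src := by rw [hi.others _ (by decide) (by decide)]; exact hp.rsi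
  have hrdi : v.reg .rdi = dst := by rw [hi.others _ (by decide) (by decide)]; exact hp.rdi
  -- 1000f2: cmp rax, rdx
  v3_insn hi.code 18 3 [0x48, 0x39, 0xd0] hp.fetch [hi.rip]
  x86_norm [hi.rip, hi.rax, hrdx]
  -- 1000f5: jb 1000e7 — two goals: taken, not taken
  v3_insn hi.code 21 2 [0x72, 0xf0] hp.fetch [cond_b_sub64]
  · -- the loop body
    rename_i hc
    have hlt : i < len.toNat := by word_omega
    -- 1000e7: movzx ecx, byte [rsi+rax]
    v3_insn hi.code 7 4 [0x0f, 0xb6, 0x0c, 0x06] hp.fetch []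
    · x86_norm [hrsi, hi.rax]
      unfold User.Layout.Has User.Layout.lo User.Layout.hi
      word_omega
    x86_norm [hrsi, hi.rax]
    -- 1000eb: mov [rdi+rax], cl
    v3_insn hi.code 11 3 [0x88, 0x0c, 0x07] hp.fetch []
    · x86_norm [hrdi, hi.rax]
      unfold User.Layout.Has User.Layout.lo User.Layout.hi
      word_omega
    x86_norm [hrdi, hi.rax]
    -- 1000ee: add rax, 1
    have hcode2 : CodeAt (v.mem.writeLE (dst + UInt64.ofNat i) 1
        (UInt64.toNat (Word.low .w8 (UInt64.ofNat (v.mem.readLE (src + UInt64.ofNat i) 1)))))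
        0x1000e0 byte_copy_bytes := by
      refine hi.code.writeLE _ _ _ (by decide) (by word_omega) ?_
      rw [show byte_copy_bytes.length = 24 from rfl]; word_omega
    v3_insn hcode2 14 4 [0x48, 0x83, 0xc0, 0x01] hp.fetch []
    x86_norm [hi.rax]
    refine Reach.done (Or.inr ⟨hlt, ?_⟩)
    have hbyte : v.mem.read (src + UInt64.ofNat i) = v0.mem.read (src + UInt64.ofNat i) := hi.srcB i hlt
    constructor
    · simp
    · simp [UInt64.ofNat_add]
    · omega
    · intro r h1 h2
      simp [h1, h2, hi.others r h1 h2]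
    · simp only [User.State.mem_setReg, User.State.mem_setFlags, User.State.mem_setRip, User.State.mem_setMem]
      rw [User.Mem.writeLE_one, User.Mem.readLE_one']
      rw [hbyte, hi.mem, User.Mem.readBytes_succ_snoc, User.Mem.load_snoc, User.Mem.length_readBytes]
      congr 1; word_omega
    · simpa using hcode2
    · simp only [User.State.mem_setReg, User.State.mem_setFlags, User.State.mem_setRip, User.State.mem_setMem]
      rw [User.Mem.readLE_writeLE_disjoint _ _ _ _ _ _ (by word_omega) (by word_omega) (by word_omega)]
      exact hi.retAddr
    · intro j hj
      simp only [User.State.mem_setReg, User.State.mem_setFlags, User.State.mem_setRip, User.State.mem_setMem]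
      rw [User.Mem.read_writeLE_disjoint _ _ _ _ _ (by word_omega) (by word_omega)]
      exact hi.srcB j hj
  · -- fall through to the `ret`
    rename_i hc
    refine Reach.done (Or.inl ⟨by word_omega, by simp, by simp, ?_⟩)
    intro r h1 h2
    simp [hi.others r h1 h2]

end

/-- The exit of the loop: at the `ret`. -/
structure CopyExit (v0 : User.State) (dst src len ret : Word) (v : User.State) : Prop where
  rip : v.rip = 0x1000f7
  others : ∀ r, r ≠ .rax → r ≠ .rcx → v.reg r = v0.reg r
  mem : v.mem = v0.mem.load dst (v0.mem.readBytes src len.toNat)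
  code : CodeAt v.mem 0x1000e0 byte_copy_bytes
  retAddr : UInt64.ofNat (v.mem.readLE (v0.reg .rsp) 8) = ret

section
variable {n : User.Layout} {v0 : User.State} {dst src len ret : Word}

theorem copy_loop (hp : CopyPre n v0 dst src len ret) :
    ∀ v, (∃ i, CopyInv v0 dst src len ret i v) → Reach n v (CopyExit v0 dst src len ret) := by
  refine Reach.loop (fun v => len.toNat - (v.reg .rax).toNat) ?_
  intro v ⟨i, hi⟩
  refine (copy_body hp i v hi).mono ?_
  intro v' h
  rcases h with ⟨hil, hrip, hmem, hoth⟩ | ⟨hlt, hi'⟩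
  · left
    refine ⟨hrip, hoth, ?_, ?_, ?_⟩
    · rw [hmem, hi.mem, hil]
    · rw [hmem]; exact hi.code
    · rw [hmem]; exact hi.retAddr
  · right
    refine ⟨⟨i + 1, hi'⟩, ?_⟩
    show len.toNat - (v'.reg .rax).toNat < len.toNat - (v.reg .rax).toNat
    have := hi.ile; rw [hi'.rax, hi.rax]; word_omega

/-- **`byte_copy` is correct** (view level): from its entry with the arguments in rdi, rsi, rdx and the return
address on the stack, execution reaches the return address with `len` bytes copied from `src` to `dst`, the stack
pointer popped, and every register except rax, rcx (and rsp) as it was. -/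
theorem byte_copy_reach (hp : CopyPre n v0 dst src len ret) :
    Reach n v0 (fun v' => v'.rip = ret ∧ v'.reg .rsp = v0.reg .rsp + 8 ∧
      v'.mem = v0.mem.load dst (v0.mem.readBytes src len.toNat) ∧
      ∀ r, r ≠ .rax → r ≠ .rcx → r ≠ .rsp → v'.reg r = v0.reg r) := by
  -- 1000e0: mov eax, 0
  v3_insn hp.code 0 5 [0xb8, 0x00, 0x00, 0x00, 0x00] hp.fetch [hp.rip]
  x86_norm [hp.rip]
  -- 1000e5: jmp 1000f2
  v3_insn hp.code 5 2 [0xeb, 0x0b] hp.fetch []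
  x86_norm []
  -- the loop
  refine (copy_loop hp _ ⟨0, ?_⟩).trans ?_
  · constructor
    · simp
    · simp
    · omega
    · intro r h1 h2; simp [h1]
    · rfl
    · exact hp.code
    · exact hp.retAddr
    · intro j hj; rfl
  -- 1000f7: ret
  intro v he
  have hsp : v.reg .rsp = v0.reg .rsp := he.others _ (by decide) (by decide)
  have hretlt := hp.retlt
  v3_insn he.code 23 1 [0xc3] hp.fetch [he.rip, hsp, he.retAddr, hretlt]
  · have h1 := hp.sp
    have h2 := hp.spOut
    unfold User.inRange at h1
    unfold User.Layout.Has User.Layout.lo User.Layout.hi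
    omega
  refine Reach.done ⟨?_, ?_, ?_, ?_⟩
  · simp [hsp, he.retAddr]
  · simp [hsp]
  · simp [he.mem]
  · intro r h1 h2 h3
    simp [h3, he.others r h1 h2]

end

/-- **`byte_copy` is correct on the model** (machine level): the statement about `X86.run` with the model's decoder — computed from all
rows of all instruction files — for every processor `μ` with `MicroOK μ` and every machine `m` in the user relation with a user state `v0`
that meets the contract, at either privilege level of the layout. -/
theorem byte_copy_correct_v3 {n : User.Layout} (μ : Microarch) (hμ : MicroOK μ) (m : Machine) (v0 : User.State) (ha : User.Abs n m v0)
    (dst src len ret : Word) (hp : CopyPre n v0 dst src len ret) :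
    ∃ k m' v', _root_.X86.run (Dec.decoder μ (Dec.mkTable X86.allRows)) m k = .next m' ∧ User.Abs n m' v' ∧
      v'.rip = ret ∧ v'.reg .rsp = v0.reg .rsp + 8 ∧
      v'.mem = v0.mem.load dst (v0.mem.readBytes src len.toNat) ∧
      (∀ r, r ≠ .rax → r ≠ .rcx → r ≠ .rsp → v'.reg r = v0.reg r) ∧
      m'.sysPart = m.sysPart := by
  obtain ⟨k, m', v', hk, ha', ⟨h1, h2, h3, h4⟩, hsys⟩ := (byte_copy_reach hp).sound μ hμ m ha
  exact ⟨k, m', v', hk, ha', h1, h2, h3, h4, hsys⟩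

end X86
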